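-- pv_equiv track=rewrite | github.com/felipecustodio/algorithm | jan-ken-puzzle-dp/puzzle_hash.py | checkIslands
-- ===== SOURCE A (Python) =====
-- def DFS(board, i, j, visited):
--     rows = len(board)
--     cols = len(board[0])
--
--     rowNbr = [-1, 1, 0, 0]
--     colNbr = [0, 0, -1, +1]
--
--     visited[i][j] = True
--
--     # Recur for all connected neighbours
--     for k in range(4):
--         iNbr = i + rowNbr[k]
--         jNbr = j + colNbr[k]
--         if ((iNbr >= 0 and iNbr < rows) and (jNbr >= 0 and jNbr < cols)):
--             if (not visited[iNbr][jNbr] and board[iNbr][jNbr]):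
--                 DFS(board, iNbr, jNbr, visited)
--
-- def checkIslands(board):
--         rows = len(board)
--         cols = len(board[0])
--         # Make a bool array to mark visited cells.
--         # Initially all cells are unvisited
--         visited = [[False for j in range(cols)] for i in range(rows)]
--
--         # Initialize count as 0 and travese
--         # through the all cells of
--         # given matrix
--         count = 0
--         for i in range(rows):
--             for j in range(cols):
--                 # If a cell with value 1 is not visited yet,
--                 # then new island found
--                 if visited[i][j] == False and board[i][j]:
--                     # Visit all cells in this island
--                     # and increment island count
--                     DFS(board, i, j, visited)
--                     count += 1
--                     if (count > 1):
--                         return False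
--         return True
-- ===== SOURCE B (Python) =====
-- # Iterative flood fill with an explicit stack from the first filled cell, then a
-- # coverage check of all filled cells -- replaces recursive DFS + component counting.
-- def checkIslands(board):
--     rows = len(board)
--     cols = len(board[0])
--     start = next(((i, j) for i in range(rows) for j in range(cols) if board[i][j]), None)
--     if start is None:
--         return True
--     visited = [[False] * cols for _ in range(rows)]
--     stack = [start]
--     while stack:
--         i, j = stack.pop()
--         if visited[i][j]:
--             continue
--         visited[i][j] = True
--         for di, dj in ((0, 1), (0, -1), (1, 0), (-1, 0)):
--             ni, nj = i + di, j + dj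
--             if 0 <= ni < rows and 0 <= nj < cols and board[ni][nj] and not visited[ni][nj]:
--                 stack.append((ni, nj))
--     return all(visited[i][j] for i in range(rows) for j in range(cols) if board[i][j])
-- ===== Notes on version B (the rewrite author's own statement) =====
-- stated objective: alternative
-- what changed: Replaces the recursive DFS with a visited matrix plus island counting by an explicit-stack flood fill started at the first filled cell, followed by a single coverage check that every filled cell was visited.
import Mathlib
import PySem

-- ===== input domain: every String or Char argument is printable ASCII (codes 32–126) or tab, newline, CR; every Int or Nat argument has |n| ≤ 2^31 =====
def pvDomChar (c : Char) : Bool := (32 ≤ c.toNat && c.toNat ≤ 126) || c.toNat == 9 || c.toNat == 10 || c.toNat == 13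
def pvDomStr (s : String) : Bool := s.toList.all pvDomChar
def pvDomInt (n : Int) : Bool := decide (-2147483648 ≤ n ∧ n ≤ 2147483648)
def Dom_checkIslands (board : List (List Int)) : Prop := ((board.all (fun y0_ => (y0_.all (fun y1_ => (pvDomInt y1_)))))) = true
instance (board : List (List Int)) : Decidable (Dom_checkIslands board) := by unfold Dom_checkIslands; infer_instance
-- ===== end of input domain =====

-- B replaces A's recursive DFS + island counting by an explicit-stack flood fill from the
-- first filled cell followed by a coverage check of all filled cells (objective: alternative).

-- ===== PORT A =====
-- shared accessors: Python's board[i][j] / visited[i][j] reads and visited[i][j] = True;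
-- every use below is guarded so that 0 ≤ i < len and 0 ≤ j < len(row), where they are exact.
def getCell (board : List (List Int)) (i j : Int) : Int :=
  (board.getD i.toNat []).getD j.toNat 0

def getVis (v : List (List Bool)) (i j : Int) : Bool :=
  (v.getD i.toNat []).getD j.toNat false

def setVis (v : List (List Bool)) (i j : Int) : List (List Bool) :=
  v.set i.toNat ((v.getD i.toNat []).set j.toNat true)

def rowNbr : List Int := [-1, 1, 0, 0]
def colNbr : List Int := [0, 0, -1, 1]

-- A's DFS recursion terminates because every call marks a previously unvisited cell;
-- the caller passes fuel = rows*cols, which is never exhausted (the fuel-irrelevance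
-- lemma DFS_FI below makes this precise).
def DFS (board : List (List Int)) : Nat → Int → Int → List (List Bool) → List (List Bool)
  | 0, _, _, visited => visited
  | fuel+1, i, j, visited =>
    let rows : Int := (board.length : Int)
    let cols : Int := ((board.headD []).length : Int)
    let visited := setVis visited i j
    (List.range 4).foldl (fun vis k =>
      let iN := i + rowNbr.getD k 0
      let jN := j + colNbr.getD k 0
      if (0 ≤ iN ∧ iN < rows) ∧ (0 ≤ jN ∧ jN < cols) then
        if getVis vis iN jN = false ∧ getCell board iN jN ≠ 0 then
          DFS board fuel iN jN vis
        else vis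
      else vis) visited

-- row-major list of all cell coordinates, shared by both ports
def cellsOf (R C : Nat) : List (Int × Int) :=
  (List.range R).flatMap (fun (a : Nat) => (List.range C).map (fun (b : Nat) => ((a : Int), (b : Int))))

def loopA (board : List (List Int)) (fuel : Nat) :
    List (Int × Int) → List (List Bool) → Int → Bool
  | [], _, _ => true
  | c :: rest, visited, count =>
    if getVis visited c.1 c.2 = false ∧ getCell board c.1 c.2 ≠ 0 then
      let visited' := DFS board fuel c.1 c.2 visited
      if count + 1 > 1 then false else loopA board fuel rest visited' (count + 1)
    else loopA board fuel rest visited count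

def checkIslands (board : List (List Int)) : Bool :=
  let rows := board.length
  let cols := (board.headD []).length
  let visited := List.replicate rows (List.replicate cols false)
  loopA board (rows * cols) (cellsOf rows cols) visited 0

-- ===== PORT B =====
-- Source B's while-loop over the explicit stack (list head = top of stack).
-- Python appends pushes in the order (0,1),(0,-1),(1,0),(-1,0); with the head as top
-- the pending pops are the reverse of that order, hence the push list below.
def floodLoop (board : List (List Int)) (rows cols : Int) :
    Nat → List (Int × Int) → List (List Bool) → List (List Bool)
  | 0, _, v => v
  | _+1, [], v => v
  | fuel+1, c :: stack, v =>
    if getVis v c.1 c.2 then floodLoop board rows cols fuel stack v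
    else
      let v1 := setVis v c.1 c.2
      let pushes := ([(c.1 - 1, c.2), (c.1 + 1, c.2), (c.1, c.2 - 1), (c.1, c.2 + 1)]).filter
        (fun n => decide ((0 ≤ n.1 ∧ n.1 < rows ∧ 0 ≤ n.2 ∧ n.2 < cols) ∧
          getCell board n.1 n.2 ≠ 0 ∧ getVis v1 n.1 n.2 = false))
      floodLoop board rows cols fuel (pushes ++ stack) v1

def checkIslands_alt (board : List (List Int)) : Bool :=
  let rows := board.length
  let cols := (board.headD []).length
  let cs := cellsOf rows cols
  match cs.find? (fun c => getCell board c.1 c.2 != 0) with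
  | none => true
  | some c0 =>
    let v0 := List.replicate rows (List.replicate cols false)
    -- fuel bound: every pop either skips an already visited cell or marks a fresh one
    -- (at most 4 pushes), so 1 + 5*rows*cols iterations always drain the stack
    let vStar := floodLoop board (rows : Int) (cols : Int) (1 + 5 * (rows * cols)) [c0] v0
    cs.all (fun c => getCell board c.1 c.2 == 0 || getVis vStar c.1 c.2)

-- ===== PRECONDITION & SPEC =====
-- Pre_ excludes exactly the inputs on which the Python A raises IndexError:
-- the empty board (board[0]) and boards having a row shorter than the first row
-- (board[i][j] for j < len(board[0])); A returns no value there.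
def Pre_checkIslands (board : List (List Int)) : Prop :=
  board ≠ [] ∧ ∀ row ∈ board, (board.headD []).length ≤ row.length

instance (board : List (List Int)) : Decidable (Pre_checkIslands board) := by
  unfold Pre_checkIslands; infer_instance

def pvWitness_checkIslands : List (List Int) := [[1, 0], [0, 1]]

def Spec_checkIslands (board : List (List Int)) (out : Bool) : Prop := out = checkIslands_alt board
instance (board : List (List Int)) (out : Bool) : Decidable (Spec_checkIslands board out) := by unfold Spec_checkIslands; infer_instance

-- ===== CLAIM (what is proved, stated in full; the proofs are below) =====
def Claim_equal_checkIslands : Prop := ∀ (board : List (List Int)), Dom_checkIslands board → Pre_checkIslands board → Spec_checkIslands board (checkIslands board)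

-- ===== LEMMAS AND PROOFS =====

-- in-bounds predicate used by both ports' guards
def inB (board : List (List Int)) (c : Int × Int) : Prop :=
  0 ≤ c.1 ∧ c.1 < (board.length : Int) ∧ 0 ≤ c.2 ∧ c.2 < (((board.headD []).length : Nat) : Int)

-- visited matrix has the board's dimensions
def Shaped (board : List (List Int)) (v : List (List Bool)) : Prop :=
  v.length = board.length ∧ ∀ a, a < v.length → (v.getD a []).length = (board.headD []).length

-- visitedness only grows (on in-bounds cells)
def VLe (board : List (List Int)) (v w : List (List Bool)) : Prop :=
  ∀ c, inB board c → getVis v c.1 c.2 = true → getVis w c.1 c.2 = true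

-- number of unvisited cells
def U (board : List (List Int)) (v : List (List Bool)) : Nat :=
  (cellsOf board.length (board.headD []).length).countP (fun c => !getVis v c.1 c.2)

-- the guarded one-neighbour step of A's DFS loop body
def gstep (board : List (List Int)) (f : Nat) (vis : List (List Bool)) (n : Int × Int) :
    List (List Bool) :=
  if (0 ≤ n.1 ∧ n.1 < (board.length : Int)) ∧
     (0 ≤ n.2 ∧ n.2 < (((board.headD []).length : Nat) : Int)) then
    if getVis vis n.1 n.2 = false ∧ getCell board n.1 n.2 ≠ 0 then DFS board f n.1 n.2 vis
    else vis
  else vis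

-- one fully recursive visit as performed by the stack loop on a popped cell
def dfsG (board : List (List Int)) (v : List (List Bool)) (c : Int × Int) :
    List (List Bool) :=
  if getVis v c.1 c.2 then v else DFS board (U board v) c.1 c.2 v

lemma DFS_succ (board : List (List Int)) (f : Nat) (i j : Int) (v : List (List Bool)) :
    DFS board (f+1) i j v =
      [(i + -1, j + 0), (i + 1, j + 0), (i + 0, j + -1), (i + 0, j + 1)].foldl
        (gstep board f) (setVis v i j) := by
  simp [DFS, gstep, rowNbr, colNbr, List.range_succ]

lemma mem_cellsOf (R C : Nat) (c : Int × Int) :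
    c ∈ cellsOf R C ↔ 0 ≤ c.1 ∧ c.1 < (R : Int) ∧ 0 ≤ c.2 ∧ c.2 < (C : Int) := by
  rcases c with ⟨x, y⟩
  constructor
  · intro hmem
    obtain ⟨a, ha, hc⟩ := List.mem_flatMap.mp hmem
    obtain ⟨b, hb, heq⟩ := List.mem_map.mp hc
    rw [List.mem_range] at ha hb
    cases heq
    refine ⟨by omega, by omega, by omega, by omega⟩
  · rintro ⟨h1, h2, h3, h4⟩
    refine List.mem_flatMap.mpr ⟨x.toNat, List.mem_range.mpr (by omega),
      List.mem_map.mpr ⟨y.toNat, List.mem_range.mpr (by omega), ?_⟩⟩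
    have hx : ((x.toNat : Nat) : Int) = x := by omega
    have hy : ((y.toNat : Nat) : Int) = y := by omega
    rw [hx, hy]

-- row access after a row update
lemma getD_set_row_ne (v : List (List Bool)) (n a : Nat) (r : List Bool) (h : a ≠ n) :
    (v.set n r).getD a [] = v.getD a [] := by
  rw [List.getD_eq_getElem?_getD, List.getElem?_set_ne (by omega), ← List.getD_eq_getElem?_getD]

lemma getD_set_row_self (v : List (List Bool)) (n : Nat) (r : List Bool) (h : n < v.length) :
    (v.set n r).getD n [] = r := by
  rw [List.getD_eq_getElem?_getD, List.getElem?_set_self h]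
  rfl

lemma getD_set_cell_ne (r : List Bool) (m b : Nat) (h : b ≠ m) :
    (r.set m true).getD b false = r.getD b false := by
  rw [List.getD_eq_getElem?_getD, List.getElem?_set_ne (by omega), ← List.getD_eq_getElem?_getD]

lemma getD_set_cell_self (r : List Bool) (m : Nat) (h : m < r.length) :
    (r.set m true).getD m false = true := by
  rw [List.getD_eq_getElem?_getD, List.getElem?_set_self h]
  rfl

lemma getD_row_oob (v : List (List Bool)) (a : Nat) (h : v.length ≤ a) :
    v.getD a [] = [] := by
  rw [List.getD_eq_getElem?_getD, List.getElem?_eq_none h]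
  rfl

lemma getD_cell_oob (r : List Bool) (b : Nat) (h : r.length ≤ b) :
    r.getD b false = false := by
  rw [List.getD_eq_getElem?_getD, List.getElem?_eq_none h]
  rfl

lemma getVis_v0 (R C : Nat) (i j : Int) :
    getVis (List.replicate R (List.replicate C false)) i j = false := by
  unfold getVis
  rcases lt_or_ge i.toNat R with h | h
  · rw [List.getD_replicate _ h]
    rcases lt_or_ge j.toNat C with h2 | h2
    · rw [List.getD_replicate _ h2]
    · rw [getD_cell_oob _ _ (by simpa using h2)]
  · rw [getD_row_oob _ _ (by simpa using h)]
    rfl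

lemma Shaped_v0 (board : List (List Int)) :
    Shaped board (List.replicate board.length (List.replicate (board.headD []).length false)) := by
  refine ⟨by simp, ?_⟩
  intro a ha
  simp only [List.length_replicate] at ha
  rw [List.getD_replicate _ ha, List.length_replicate]

-- setVis can only turn cells true, never back
lemma getVis_setVis_mono (v : List (List Bool)) (i j a b : Int)
    (h : getVis v a b = true) : getVis (setVis v i j) a b = true := by
  unfold getVis setVis at *
  rcases eq_or_ne a.toNat i.toNat with hrow | hrow
  · rcases lt_or_ge i.toNat v.length with hi | hi
    · rw [hrow, getD_set_row_self v _ _ hi]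
      rcases eq_or_ne b.toNat j.toNat with hcol | hcol
      · rcases lt_or_ge j.toNat (v.getD i.toNat []).length with hj | hj
        · rw [hcol, getD_set_cell_self _ _ hj]
        · rw [List.set_eq_of_length_le hj, ← hrow]
          exact h
      · rw [getD_set_cell_ne _ _ _ hcol, ← hrow]
        exact h
    · rw [List.set_eq_of_length_le hi]
      exact h
  · rw [getD_set_row_ne v _ _ _ hrow]
    exact h

lemma getVis_setVis_self (board : List (List Int)) (v : List (List Bool)) (i j : Int)
    (hS : Shaped board v) (h : inB board (i, j)) :
    getVis (setVis v i j) i j = true := by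
  obtain ⟨h1, h2, h3, h4⟩ := h
  have hiv : i.toNat < v.length := by rw [hS.1]; omega
  have hjv : j.toNat < (v.getD i.toNat []).length := by
    rw [hS.2 i.toNat hiv]
    omega
  unfold getVis setVis
  rw [getD_set_row_self v _ _ hiv, getD_set_cell_self _ _ hjv]

lemma Shaped_setVis (board : List (List Int)) (v : List (List Bool)) (i j : Int)
    (hS : Shaped board v) : Shaped board (setVis v i j) := by
  obtain ⟨hlen, hrows⟩ := hS
  refine ⟨by simpa [setVis], ?_⟩
  intro a ha
  simp only [setVis, List.length_set] at ha
  rcases eq_or_ne a i.toNat with rfl | hne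
  · rw [setVis, getD_set_row_self v _ _ ha, List.length_set]
    exact hrows _ ha
  · rw [setVis, getD_set_row_ne v _ _ _ hne]
    exact hrows _ ha

lemma VLe_refl (board : List (List Int)) (v : List (List Bool)) : VLe board v v :=
  fun _ _ h => h

lemma VLe_trans {board : List (List Int)} {u v w : List (List Bool)}
    (h1 : VLe board u v) (h2 : VLe board v w) : VLe board u w :=
  fun c hc h => h2 c hc (h1 c hc h)

lemma VLe_setVis (board : List (List Int)) (v : List (List Bool)) (i j : Int) :
    VLe board v (setVis v i j) :=
  fun _ _ h => getVis_setVis_mono _ _ _ _ _ h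

-- DFS preserves shape and only grows the visited set
lemma DFS_grow (board : List (List Int)) :
    ∀ (f : Nat) (i j : Int) (v : List (List Bool)), Shaped board v →
      Shaped board (DFS board f i j v) ∧ VLe board v (DFS board f i j v) := by
  intro f
  induction f with
  | zero => intro i j v hS; exact ⟨hS, VLe_refl board v⟩
  | succ f ih =>
    have hstep : ∀ (n : Int × Int) (v : List (List Bool)), Shaped board v →
        Shaped board (gstep board f v n) ∧ VLe board v (gstep board f v n) := by
      intro n v hS
      unfold gstep
      split
      · split
        · exact ih n.1 n.2 v hS
        · exact ⟨hS, VLe_refl board v⟩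
      · exact ⟨hS, VLe_refl board v⟩
    have hfold : ∀ (l : List (Int × Int)) (v : List (List Bool)), Shaped board v →
        Shaped board (l.foldl (gstep board f) v) ∧ VLe board v (l.foldl (gstep board f) v) := by
      intro l
      induction l with
      | nil => intro v hS; exact ⟨hS, VLe_refl board v⟩
      | cons n l ihl =>
        intro v hS
        obtain ⟨hS1, hL1⟩ := hstep n v hS
        obtain ⟨hS2, hL2⟩ := ihl _ hS1
        exact ⟨hS2, VLe_trans hL1 hL2⟩
    intro i j v hS
    rw [DFS_succ]
    obtain ⟨hS2, hL2⟩ := hfold _ (setVis v i j) (Shaped_setVis board v i j hS)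
    exact ⟨hS2, VLe_trans (VLe_setVis board v i j) hL2⟩

lemma countP_lt (l : List (Int × Int)) (p q : Int × Int → Bool)
    (hpq : ∀ a ∈ l, p a = true → q a = true) :
    ∀ a ∈ l, q a = true → p a = false → l.countP p < l.countP q := by
  induction l with
  | nil => intro a ha; simp at ha
  | cons x l ih =>
    intro a ha hqa hpa
    rw [List.countP_cons, List.countP_cons]
    rcases List.mem_cons.mp ha with rfl | ha'
    · have hle : l.countP p ≤ l.countP q :=
        List.countP_mono_left (fun b hb => hpq b (List.mem_cons_of_mem _ hb))
      simp [hpa, hqa]; omega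
    · have := ih (fun b hb => hpq b (List.mem_cons_of_mem _ hb)) a ha' hqa hpa
      have hx : (if p x then 1 else 0) ≤ (if q x then 1 else 0) := by
        by_cases h : p x = true
        · simp [h, hpq x (List.mem_cons_self) h]
        · simp at h; simp [h]
      omega

lemma U_antitone {board : List (List Int)} {v w : List (List Bool)}
    (h : VLe board v w) : U board w ≤ U board v := by
  apply List.countP_mono_left
  intro c hc hw
  have hcb : inB board c := by
    have := (mem_cellsOf board.length (board.headD []).length c).mp hc
    exact ⟨this.1, this.2.1, this.2.2.1, this.2.2.2⟩
  cases hv : getVis v c.1 c.2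
  · rfl
  · rw [h c hcb hv] at hw
    exact absurd hw (by simp)

lemma U_setVis_lt (board : List (List Int)) (v : List (List Bool)) (c : Int × Int)
    (hS : Shaped board v) (hc : inB board c) (hun : getVis v c.1 c.2 = false) :
    U board (setVis v c.1 c.2) < U board v := by
  unfold U
  have hmem : c ∈ cellsOf board.length (board.headD []).length := by
    rw [mem_cellsOf]
    exact ⟨hc.1, hc.2.1, hc.2.2.1, hc.2.2.2⟩
  have hpq : ∀ a ∈ cellsOf board.length (board.headD []).length,
      (!getVis (setVis v c.1 c.2) a.1 a.2) = true → (!getVis v a.1 a.2) = true := by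
    intro a _ hpa
    cases hv : getVis v a.1 a.2
    · rfl
    · rw [getVis_setVis_mono v c.1 c.2 a.1 a.2 hv] at hpa
      exact absurd hpa (by simp)
  exact countP_lt _ _ _ hpq c hmem (by simp [hun])
    (by simp [getVis_setVis_self board v c.1 c.2 hS hc])

lemma U_pos (board : List (List Int)) (v : List (List Bool)) (c : Int × Int)
    (hc : inB board c) (hun : getVis v c.1 c.2 = false) : 0 < U board v := by
  rw [U, List.countP_pos_iff]
  refine ⟨c, ?_, by simp [hun]⟩
  rw [mem_cellsOf]
  exact ⟨hc.1, hc.2.1, hc.2.2.1, hc.2.2.2⟩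


-- fuel irrelevance: any fuel ≥ number of unvisited cells gives the same result
lemma DFS_FI (board : List (List Int)) :
    ∀ (n : Nat) (v : List (List Bool)) (i j : Int) (f1 f2 : Nat),
      Shaped board v → inB board (i, j) → getVis v i j = false →
      U board v ≤ n → U board v ≤ f1 → U board v ≤ f2 →
      DFS board f1 i j v = DFS board f2 i j v := by
  intro n
  induction n with
  | zero =>
    intro v i j f1 f2 hS hin hun hn _ _
    exact absurd (U_pos board v (i, j) hin hun) (by omega)
  | succ n ih =>
    intro v i j f1 f2 hS hin hun hn h1 h2
    have hupos : 0 < U board v := U_pos board v (i, j) hin hun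
    obtain ⟨a, rfl⟩ : ∃ a, f1 = a + 1 := ⟨f1 - 1, by omega⟩
    obtain ⟨b, rfl⟩ : ∃ b, f2 = b + 1 := ⟨f2 - 1, by omega⟩
    rw [DFS_succ, DFS_succ]
    have hS1 : Shaped board (setVis v i j) := Shaped_setVis board v i j hS
    have hU1 : U board (setVis v i j) < U board v := U_setVis_lt board v (i, j) hS hin hun
    have hfold : ∀ (l : List (Int × Int)) (v' : List (List Bool)),
        Shaped board v' → U board v' ≤ U board (setVis v i j) →
        l.foldl (gstep board a) v' = l.foldl (gstep board b) v' := by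
      intro l
      induction l with
      | nil => intro v' _ _; rfl
      | cons m l ihl =>
        intro v' hS' hU'
        have hstepeq : gstep board a v' m = gstep board b v' m := by
          unfold gstep
          split
          · rename_i hib
            split
            · rename_i hg
              exact ih v' m.1 m.2 a b hS' ⟨hib.1.1, hib.1.2, hib.2.1, hib.2.2⟩ hg.1
                (by omega) (by omega) (by omega)
            · rfl
          · rfl
        rw [List.foldl_cons, List.foldl_cons, hstepeq]
        have hgrow : Shaped board (gstep board b v' m) ∧ VLe board v' (gstep board b v' m) := by
          unfold gstep
          split
          · split
            · exact DFS_grow board b m.1 m.2 v' hS'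
            · exact ⟨hS', VLe_refl board v'⟩
          · exact ⟨hS', VLe_refl board v'⟩
        exact ihl _ hgrow.1 (le_trans (U_antitone hgrow.2) hU')
    exact hfold _ (setVis v i j) hS1 (le_refl _)

-- the filter Source B applies before pushing a neighbour
def pushOK (board : List (List Int)) (v1 : List (List Bool)) (n : Int × Int) : Bool :=
  decide ((0 ≤ n.1 ∧ n.1 < (board.length : Int) ∧ 0 ≤ n.2 ∧
      n.2 < (((board.headD []).length : Nat) : Int)) ∧
    getCell board n.1 n.2 ≠ 0 ∧ getVis v1 n.1 n.2 = false)

-- processing A's neighbour loop equals processing Source B's filtered pushes one by one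
lemma fold_gstep_eq_fold_dfsG (board : List (List Int)) (v1 : List (List Bool)) (u : Nat)
    (hu : U board v1 ≤ u) :
    ∀ (l : List (Int × Int)) (v' : List (List Bool)),
      Shaped board v' → U board v' ≤ U board v1 → VLe board v1 v' →
      l.foldl (gstep board u) v' = (l.filter (pushOK board v1)).foldl (dfsG board) v' := by
  intro l
  induction l with
  | nil => intro v' _ _ _; rfl
  | cons m l ihl =>
    intro v' hS' hU' hL'
    by_cases hok : pushOK board v1 m = true
    · rw [List.filter_cons_of_pos hok, List.foldl_cons, List.foldl_cons]
      rw [pushOK, decide_eq_true_eq] at hok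
      obtain ⟨hib, hfill, _⟩ := hok
      have hstep : gstep board u v' m = dfsG board v' m := by
        unfold gstep dfsG
        rw [if_pos (show (0 ≤ m.1 ∧ m.1 < (board.length : Int)) ∧
          (0 ≤ m.2 ∧ m.2 < (((board.headD []).length : Nat) : Int)) from
          ⟨⟨hib.1, hib.2.1⟩, hib.2.2.1, hib.2.2.2⟩)]
        cases hvm : getVis v' m.1 m.2 with
        | true => simp
        | false =>
          have hdfs : DFS board u m.1 m.2 v' = DFS board (U board v') m.1 m.2 v' :=
            DFS_FI board (U board v') v' m.1 m.2 u (U board v') hS'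
              ⟨hib.1, hib.2.1, hib.2.2.1, hib.2.2.2⟩ hvm (le_refl _) (by omega) (le_refl _)
          simp [hfill, hdfs]
      rw [hstep]
      have hgrow : Shaped board (dfsG board v' m) ∧ VLe board v' (dfsG board v' m) := by
        unfold dfsG
        split
        · exact ⟨hS', VLe_refl board v'⟩
        · exact DFS_grow board _ m.1 m.2 v' hS'
      exact ihl _ hgrow.1 (le_trans (U_antitone hgrow.2) hU') (VLe_trans hL' hgrow.2)
    · rw [List.filter_cons_of_neg (by simpa using hok), List.foldl_cons]
      have hstep : gstep board u v' m = v' := by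
        unfold gstep
        rw [pushOK, decide_eq_true_eq] at hok
        split
        · rename_i hib
          have hib' : inB board m := ⟨hib.1.1, hib.1.2, hib.2.1, hib.2.2⟩
          split
          · rename_i hg
            exfalso
            have hv1 : getVis v1 m.1 m.2 = true := by
              cases hx : getVis v1 m.1 m.2
              · exact absurd ⟨⟨hib.1.1, hib.1.2, hib.2.1, hib.2.2⟩, hg.2, hx⟩ hok
              · rfl
            rw [hL' m hib' hv1] at hg
            exact absurd hg.1 (by simp)
          · rfl
        · rfl
      rw [hstep]
      exact ihl _ hS' hU' hL'

-- one popped unvisited cell is processed exactly like one recursive DFS call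
lemma dfs_eq_pushfold (board : List (List Int)) (v : List (List Bool)) (c : Int × Int)
    (hS : Shaped board v) (hc : inB board c) (hun : getVis v c.1 c.2 = false) (f : Nat)
    (hf : U board v ≤ f) :
    DFS board f c.1 c.2 v =
      (([(c.1 - 1, c.2), (c.1 + 1, c.2), (c.1, c.2 - 1), (c.1, c.2 + 1)]).filter
          (pushOK board (setVis v c.1 c.2))).foldl (dfsG board) (setVis v c.1 c.2) := by
  have hupos : 0 < U board v := U_pos board v c hc hun
  obtain ⟨u, rfl⟩ : ∃ u, f = u + 1 := ⟨f - 1, by omega⟩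
  rw [DFS_succ]
  have hlist : [(c.1 + -1, c.2 + 0), (c.1 + 1, c.2 + 0), (c.1 + 0, c.2 + -1), (c.1 + 0, c.2 + 1)]
      = [(c.1 - 1, c.2), (c.1 + 1, c.2), (c.1, c.2 - 1), (c.1, c.2 + 1)] := by
    norm_num [Int.sub_eq_add_neg]
  rw [hlist]
  have hU1 : U board (setVis v c.1 c.2) < U board v := U_setVis_lt board v c hS hc hun
  exact fold_gstep_eq_fold_dfsG board (setVis v c.1 c.2) u (by omega) _ _
    (Shaped_setVis board v c.1 c.2 hS) (le_refl _) (VLe_refl board _)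

-- the stack loop computes the left fold of full recursive visits over the stack
lemma flood_eq (board : List (List Int)) :
    ∀ (n : Nat) (S : List (Int × Int)) (v : List (List Bool)) (f : Nat),
      Shaped board v → (∀ c ∈ S, inB board c ∧ getCell board c.1 c.2 ≠ 0) →
      S.length + 5 * U board v ≤ n → S.length + 5 * U board v ≤ f →
      floodLoop board (board.length : Int) (((board.headD []).length : Nat) : Int) f S v =
        S.foldl (dfsG board) v := by
  intro n
  induction n with
  | zero =>
    intro S v f hS hstk hn hf
    cases S with
    | nil => cases f <;> rfl
    | cons c S' =>
      exfalso
      rw [List.length_cons] at hn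
      omega
  | succ n ih =>
    intro S v f hS hstk hn hf
    cases S with
    | nil => cases f <;> rfl
    | cons c S' =>
      rw [List.length_cons] at hn hf
      obtain ⟨f', rfl⟩ : ∃ f', f = f' + 1 := ⟨f - 1, by omega⟩
      rw [List.foldl_cons]
      by_cases hv : getVis v c.1 c.2 = true
      · have : floodLoop board (board.length : Int) (((board.headD []).length : Nat) : Int)
            (f' + 1) (c :: S') v =
            floodLoop board (board.length : Int) (((board.headD []).length : Nat) : Int) f' S' v := by
          simp only [floodLoop, hv, if_true]
        rw [this, dfsG, if_pos hv]
        exact ih S' v f' hS (fun d hd => hstk d (List.mem_cons_of_mem _ hd))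
          (by omega) (by omega)
      · simp only [Bool.not_eq_true] at hv
        obtain ⟨hcb, hcf⟩ := hstk c List.mem_cons_self
        have hU1 : U board (setVis v c.1 c.2) < U board v := U_setVis_lt board v c hS hcb hv
        have hstep : floodLoop board (board.length : Int) (((board.headD []).length : Nat) : Int)
            (f' + 1) (c :: S') v =
            floodLoop board (board.length : Int) (((board.headD []).length : Nat) : Int) f'
              ((([(c.1 - 1, c.2), (c.1 + 1, c.2), (c.1, c.2 - 1), (c.1, c.2 + 1)]).filter
                (pushOK board (setVis v c.1 c.2))) ++ S') (setVis v c.1 c.2) := by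
          simp only [floodLoop, hv, if_false, Bool.false_eq_true]
          rfl
        rw [hstep]
        set ps := (([(c.1 - 1, c.2), (c.1 + 1, c.2), (c.1, c.2 - 1), (c.1, c.2 + 1)]).filter
          (pushOK board (setVis v c.1 c.2))) with hps
        have hpslen : ps.length ≤ 4 := by
          have := List.length_filter_le (pushOK board (setVis v c.1 c.2))
            [(c.1 - 1, c.2), (c.1 + 1, c.2), (c.1, c.2 - 1), (c.1, c.2 + 1)]
          simpa [hps] using this
        have hstk' : ∀ d ∈ ps ++ S', inB board d ∧ getCell board d.1 d.2 ≠ 0 := by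
          intro d hd
          rcases List.mem_append.mp hd with hd | hd
          · rw [hps, List.mem_filter] at hd
            have := hd.2
            rw [pushOK, decide_eq_true_eq] at this
            exact ⟨⟨this.1.1, this.1.2.1, this.1.2.2.1, this.1.2.2.2⟩, this.2.1⟩
          · exact hstk d (List.mem_cons_of_mem _ hd)
        have hrec := ih (ps ++ S') (setVis v c.1 c.2) f'
          (Shaped_setVis board v c.1 c.2 hS) hstk'
          (by rw [List.length_append]; omega)
          (by rw [List.length_append]; omega)
        rw [hrec, List.foldl_append]
        congr 1
        rw [dfsG, if_neg (by simp [hv])]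
        exact (dfs_eq_pushfold board v c hS hcb hv (U board v) (le_refl _)).symm

-- size of the cell list
lemma length_cellsOf (R C : Nat) : (cellsOf R C).length = R * C := by
  simp [cellsOf, List.length_flatMap]

lemma U_v0 (board : List (List Int)) :
    U board (List.replicate board.length (List.replicate (board.headD []).length false)) =
      board.length * (board.headD []).length := by
  rw [U, ← length_cellsOf board.length (board.headD []).length]
  apply List.countP_eq_length.mpr
  intro c _
  simp [getVis_v0]

-- a DFS call with positive fuel marks its own cell
lemma DFS_marks_self (board : List (List Int)) (f : Nat) (c : Int × Int)
    (v : List (List Bool)) (hS : Shaped board v) (hc : inB board c) :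
    getVis (DFS board (f + 1) c.1 c.2 v) c.1 c.2 = true := by
  rw [DFS_succ]
  have h1 : getVis (setVis v c.1 c.2) c.1 c.2 = true := getVis_setVis_self board v c.1 c.2 hS hc
  have hfold : ∀ (l : List (Int × Int)) (v' : List (List Bool)), Shaped board v' →
      getVis v' c.1 c.2 = true → getVis (l.foldl (gstep board f) v') c.1 c.2 = true := by
    intro l
    induction l with
    | nil => intro v' _ h; exact h
    | cons m l ihl =>
      intro v' hS' h
      have hgrow : Shaped board (gstep board f v' m) ∧ VLe board v' (gstep board f v' m) := by
        unfold gstep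
        split
        · split
          · exact DFS_grow board f m.1 m.2 v' hS'
          · exact ⟨hS', VLe_refl board v'⟩
        · exact ⟨hS', VLe_refl board v'⟩
      exact ihl _ hgrow.1 (hgrow.2 c hc h)
  exact hfold _ _ (Shaped_setVis board v c.1 c.2 hS) h1

-- A's scan once one island has been counted: true iff every filled cell is visited
lemma loopA_count_one (board : List (List Int)) (f : Nat) :
    ∀ (cs : List (Int × Int)) (v : List (List Bool)),
      loopA board f cs v 1 = cs.all (fun c => getCell board c.1 c.2 == 0 || getVis v c.1 c.2) := by
  intro cs
  induction cs with
  | nil => intro v; rfl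
  | cons c cs ih =>
    intro v
    rw [List.all_cons]
    by_cases hg : getVis v c.1 c.2 = false ∧ getCell board c.1 c.2 ≠ 0
    · have : loopA board f (c :: cs) v 1 = false := by
        simp only [loopA, if_pos hg]
        norm_num
      rw [this]
      have : (getCell board c.1 c.2 == 0 || getVis v c.1 c.2) = false := by
        simp [hg.1, hg.2]
      rw [this, Bool.false_and]
    · have hL : loopA board f (c :: cs) v 1 = loopA board f cs v 1 := by
        simp only [loopA, if_neg hg]
      have hc : (getCell board c.1 c.2 == 0 || getVis v c.1 c.2) = true := by
        rcases Classical.em (getCell board c.1 c.2 = 0) with h | h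
        · simp [h]
        · have : ¬ getVis v c.1 c.2 = false := fun hv => hg ⟨hv, h⟩
          simp only [Bool.not_eq_false] at this
          simp [this]
      rw [hL, hc, Bool.true_and, ih]

-- main induction over the row-major cell list with the all-false visited matrix
lemma main_scan (board : List (List Int)) :
    ∀ (cs : List (Int × Int)), (∀ c ∈ cs, inB board c) →
      loopA board (board.length * (board.headD []).length) cs
        (List.replicate board.length (List.replicate (board.headD []).length false)) 0 =
      (match cs.find? (fun c => getCell board c.1 c.2 != 0) with
       | none => true
       | some c0 =>
         cs.all (fun c => getCell board c.1 c.2 == 0 ||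
           getVis (floodLoop board (board.length : Int)
             (((board.headD []).length : Nat) : Int)
             (1 + 5 * (board.length * (board.headD []).length)) [c0]
             (List.replicate board.length (List.replicate (board.headD []).length false)))
             c.1 c.2)) := by
  set v0 := List.replicate board.length (List.replicate (board.headD []).length false) with hv0
  intro cs
  induction cs with
  | nil => intro _; rfl
  | cons c cs ih =>
    intro hcs
    have hcb : inB board c := hcs c List.mem_cons_self
    by_cases hfill : getCell board c.1 c.2 = 0
    · -- unfilled head: both sides skip it
      have hfind : (c :: cs).find? (fun c => getCell board c.1 c.2 != 0) =
          cs.find? (fun c => getCell board c.1 c.2 != 0) := by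
        rw [List.find?_cons_of_neg (by simp [hfill])]
      have hng : ¬(getVis v0 c.1 c.2 = false ∧ getCell board c.1 c.2 ≠ 0) := by
        simp [hfill]
      have hloop : loopA board (board.length * (board.headD []).length) (c :: cs) v0 0 =
          loopA board (board.length * (board.headD []).length) cs v0 0 := by
        simp only [loopA]
        rw [if_neg hng]
      rw [hloop, hfind, ih (fun d hd => hcs d (List.mem_cons_of_mem _ hd))]
      cases hf : cs.find? (fun c => getCell board c.1 c.2 != 0) with
      | none => rfl
      | some c0 => simp [hfill]
    · -- first filled cell: A floods it and scans on with count 1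
      have hun : getVis v0 c.1 c.2 = false := by rw [hv0]; exact getVis_v0 _ _ _ _
      have hfind : (c :: cs).find? (fun c => getCell board c.1 c.2 != 0) = some c := by
        rw [List.find?_cons_of_pos (by simp [hfill])]
      rw [hfind]
      have hS0 : Shaped board v0 := by rw [hv0]; exact Shaped_v0 board
      have hU0 : U board v0 = board.length * (board.headD []).length := by
        rw [hv0]; exact U_v0 board
      -- A's side
      have hg : getVis v0 c.1 c.2 = false ∧ getCell board c.1 c.2 ≠ 0 := ⟨hun, hfill⟩
      have hloop : loopA board (board.length * (board.headD []).length) (c :: cs) v0 0 =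
          loopA board (board.length * (board.headD []).length) cs
            (DFS board (board.length * (board.headD []).length) c.1 c.2 v0) 1 := by
        simp only [loopA]
        rw [if_pos hg]
        norm_num
      rw [hloop, loopA_count_one]
      -- B's side: the flood of [c] is one full DFS call with the same fuel
      have hflood : floodLoop board (board.length : Int)
          (((board.headD []).length : Nat) : Int)
          (1 + 5 * (board.length * (board.headD []).length)) [c] v0 =
          DFS board (board.length * (board.headD []).length) c.1 c.2 v0 := by
        have := flood_eq board (1 + 5 * U board v0) [c] v0
          (1 + 5 * (board.length * (board.headD []).length)) hS0
          (fun d hd => by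
            rcases List.mem_singleton.mp hd with rfl
            exact ⟨hcb, hfill⟩)
          (by simp) (by simp [hU0])
        rw [this, List.foldl_cons, List.foldl_nil, dfsG, if_neg (by simp [hun]), hU0]
      have hself : getVis (DFS board (board.length * (board.headD []).length) c.1 c.2 v0)
          c.1 c.2 = true := by
        have hpos : 0 < board.length * (board.headD []).length := by
          have := U_pos board v0 c hcb hun
          omega
        obtain ⟨m, hm⟩ : ∃ m, board.length * (board.headD []).length = m + 1 :=
          ⟨board.length * (board.headD []).length - 1, by omega⟩
        rw [hm]
        exact DFS_marks_self board m c v0 hS0 hcb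
      simp only [List.all_cons, hflood, hself, Bool.or_true, Bool.true_and]

-- ===== VERDICT (by name: the statement is the Claim_ definition above) =====
theorem checkIslands_spec : Claim_equal_checkIslands := by
  intro board _ _
  unfold Spec_checkIslands checkIslands checkIslands_alt
  have := main_scan board (cellsOf board.length (board.headD []).length)
    (fun c hc => by
      have := (mem_cellsOf board.length (board.headD []).length c).mp hc
      exact ⟨this.1, this.2.1, this.2.2.1, this.2.2.2⟩)
  simpa using this
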